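-- pv_equiv track=rewrite | github.com/kelvinhuang0327/number-pattern-research | tools/retrospective_539_115000051.py | method_gap
-- ===== SOURCE A (Python) =====
-- POOL = 39
--
-- PICK = 5
--
-- def method_gap(hist, window=200):
--     """Gap analysis - most overdue numbers"""
--     recent = hist[-window:]
--     last_seen = {}
--     for i, d in enumerate(recent):
--         for n in d['numbers']:
--             last_seen[n] = i
--     current = len(recent)
--     gaps = {}
--     for n in range(1, POOL + 1):
--         gaps[n] = current - last_seen.get(n, -1)
--     ranked = sorted(gaps, key=lambda x: -gaps[x])
--     return sorted(ranked[:PICK])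
-- ===== SOURCE B (Python) =====
-- POOL = 39
--
-- PICK = 5
--
-- def method_gap(hist, window=200):
--     """Gap analysis - most overdue numbers (reverse scan with early exit)"""
--     recent = hist[-window:]
--     current = len(recent)
--     gaps = {}
--     remaining = set(range(1, POOL + 1))
--     offset = 1
--     for d in reversed(recent):
--         if not remaining:
--             break
--         for n in d['numbers']:
--             if n in remaining:
--                 gaps[n] = offset
--                 remaining.discard(n)
--         offset += 1
--     for n in remaining:
--         gaps[n] = current + 1
--     # pick the PICK most overdue: order by gap descending, ties by smaller number
--     # (single integer key: gap dominates, number in 1..POOL breaks ties)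
--     top = sorted(range(1, POOL + 1), key=lambda n: n - gaps[n] * (POOL + 1))[:PICK]
--     return sorted(top)
-- ===== Notes on version B (the rewrite author's own statement) =====
-- stated objective: alternative
-- what changed: Instead of a forward pass that overwrites a last-seen index for every number of every draw, B scans the window backwards recording each number's gap at its first (most recent) hit and stops early once all 39 numbers have been seen, then ranks with an explicit combined key (gap descending, number ascending) over 1..39 rather than relying on dict insertion order plus stable sort.
import Mathlib
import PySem

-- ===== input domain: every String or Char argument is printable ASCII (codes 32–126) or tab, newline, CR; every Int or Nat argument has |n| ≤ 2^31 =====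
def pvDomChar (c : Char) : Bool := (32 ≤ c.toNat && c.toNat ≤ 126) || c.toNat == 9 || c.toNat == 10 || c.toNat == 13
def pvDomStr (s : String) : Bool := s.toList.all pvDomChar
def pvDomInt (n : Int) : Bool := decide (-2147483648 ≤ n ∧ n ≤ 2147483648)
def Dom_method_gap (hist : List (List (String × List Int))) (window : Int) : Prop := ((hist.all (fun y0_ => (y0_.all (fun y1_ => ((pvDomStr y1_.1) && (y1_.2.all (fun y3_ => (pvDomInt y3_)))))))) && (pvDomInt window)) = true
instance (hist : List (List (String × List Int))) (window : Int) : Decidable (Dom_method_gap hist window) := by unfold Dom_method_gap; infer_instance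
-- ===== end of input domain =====

-- B scans `recent` backwards with an early exit once every number 1..39 has been seen,
-- instead of A's forward pass that overwrites a last-seen index for every draw.
-- Objective: alternative decomposition (reverse scan + early exit); equivalence of the
-- RETURN value is proved on Pre_ (dicts in the window carry the key "numbers").

-- ===== PORT A =====
-- d['numbers'] ; under Pre_ the key is present, so the `getD []` default is never used
def pvNumbers (d : List (String × List Int)) : List Int :=
  (PySem.Dict.get? (PySem.Dict.mk d) "numbers").getD []

-- last_seen = {}; for i, d in enumerate(recent): for n in d['numbers']: last_seen[n] = i
def pvLastSeen (recent : List (List (String × List Int))) : PySem.Dict Int Int :=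
  (PySem.List.enumerate recent 0).foldl
    (fun ls p => (pvNumbers p.2).foldl (fun ls n => ls.insert n p.1) ls)
    PySem.Dict.empty

-- gaps = {}; for n in range(1, POOL+1): gaps[n] = current - last_seen.get(n, -1)
def pvGapsA (recent : List (List (String × List Int))) : PySem.Dict Int Int :=
  (PySem.List.pyRange 1 (39 + 1) 1).foldl
    (fun g n => g.insert n ((recent.length : Int) - PySem.Dict.getD (pvLastSeen recent) n (-1)))
    PySem.Dict.empty

def method_gap (hist : List (List (String × List Int))) (window : Int) : List Int :=
  let recent := PySem.List.slice hist (some (-window)) none   -- hist[-window:]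
  let gaps := pvGapsA recent
  -- ranked = sorted(gaps, key=lambda x: -gaps[x])  (gaps[x] always present: getD exact)
  let ranked := PySem.List.sorted (PySem.Dict.keys gaps) (fun x => -(PySem.Dict.getD gaps x 0)) false
  PySem.List.sorted (ranked.take 5) (fun x => x) false        -- sorted(ranked[:PICK])

-- ===== PORT B =====
-- for d in reversed(recent): if not remaining: break;
--   for n in d['numbers']: if n in remaining: gaps[n] = offset; remaining.discard(n)
--   offset += 1
def pvScanB : List (List (String × List Int)) → Int → PySem.Set Int → PySem.Dict Int Int →
    PySem.Set Int × PySem.Dict Int Int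
  | [], _, remaining, gaps => (remaining, gaps)
  | d :: rest, offset, remaining, gaps =>
    if remaining.isEmpty then (remaining, gaps)
    else
      let st := (pvNumbers d).foldl
        (fun st n =>
          if PySem.Set.contains st.1 n then (PySem.Set.discard st.1 n, st.2.insert n offset)
          else st)
        (remaining, gaps)
      pvScanB rest (offset + 1) st.1 st.2

def method_gap_alt (hist : List (List (String × List Int))) (window : Int) : List Int :=
  let recent := PySem.List.slice hist (some (-window)) none   -- hist[-window:]
  let current : Int := recent.length
  let st := pvScanB recent.reverse 1 (PySem.Set.ofList (PySem.List.pyRange 1 (39 + 1) 1)) PySem.Dict.empty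
  -- for n in remaining: gaps[n] = current + 1   (set iteration: gaps is only READ via
  -- lookups afterwards, so the fold order over the Set cannot affect the result)
  let gaps := st.1.foldl (fun g n => g.insert n (current + 1)) st.2
  -- top = sorted(range(1, POOL+1), key=lambda n: n - gaps[n]*(POOL+1))[:PICK]
  let top := (PySem.List.sorted (PySem.List.pyRange 1 (39 + 1) 1)
      (fun n => n - PySem.Dict.getD gaps n 0 * (39 + 1)) false).take 5
  PySem.List.sorted top (fun x => x) false                    -- sorted(top)

-- ===== PRECONDITION & SPEC =====
-- Pre_ excludes exactly the inputs where Python A raises KeyError: a dict inside the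
-- sliced window hist[-window:] that has no key "numbers".
def Pre_method_gap (hist : List (List (String × List Int))) (window : Int) : Prop :=
  ∀ d ∈ PySem.List.slice hist (some (-window)) none,
    (PySem.Dict.get? (PySem.Dict.mk d) "numbers").isSome = true
instance (hist : List (List (String × List Int))) (window : Int) : Decidable (Pre_method_gap hist window) := by unfold Pre_method_gap; infer_instance

def pvWitness_method_gap : (List (List (String × List Int))) × Int :=
  ([[("numbers", [1, 2, 3])], [("numbers", [7])]], 200)

def Spec_method_gap (hist : List (List (String × List Int))) (window : Int) (out : List Int) : Prop := out = method_gap_alt hist window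
instance (hist : List (List (String × List Int))) (window : Int) (out : List Int) : Decidable (Spec_method_gap hist window out) := by unfold Spec_method_gap; infer_instance

-- ===== CLAIM (what is proved, stated in full; the proofs are below) =====
def Claim_equal_method_gap : Prop := ∀ (hist : List (List (String × List Int))) (window : Int), Dom_method_gap hist window → Pre_method_gap hist window → Spec_method_gap hist window (method_gap hist window)

-- ===== LEMMAS AND PROOFS =====

-- the common semantic core: the gap of number n is 1 + (index of the first draw, scanning
-- from the most recent backwards, that contains n), or length+1 if n never occurs
def pvGapOf (rs : List (List (String × List Int))) (n : Int) : Int :=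
  match rs.findIdx? (fun d => (pvNumbers d).contains n) with
  | some j => (j : Int) + 1
  | none => (rs.length : Int) + 1

-- get? after a fold of inserts with a key-determined value
theorem pv_get?_foldl_insert (l : List Int) (f : Int → Int) :
    ∀ (d : PySem.Dict Int Int) (m : Int),
    ((l.foldl (fun g n => g.insert n (f n)) d).get? m) = if m ∈ l then some (f m) else d.get? m := by
  induction l with
  | nil => intro d m; simp
  | cons a t ih =>
    intro d m
    simp only [List.foldl_cons, ih (d.insert a (f a)) m, List.mem_cons]
    by_cases hmt : m ∈ t
    · simp [hmt]
    · by_cases hma : m = a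
      · subst hma; simp [hmt, PySem.Dict.get?_insert_self]
      · simp [hmt, hma, PySem.Dict.get?_insert_of_ne _ _ hma]

-- keys after a fold of inserts of fresh, pairwise-distinct keys into the empty dict
theorem pv_keys_foldl_insert_aux (l : List Int) (f : Int → Int) :
    ∀ (d : PySem.Dict Int Int), l.Nodup → (∀ n ∈ l, d.contains n = false) →
    PySem.Dict.keys (l.foldl (fun g n => g.insert n (f n)) d) = PySem.Dict.keys d ++ l := by
  induction l with
  | nil => intro d _ _; simp
  | cons a t ih =>
    intro d hnd hfresh
    have ha : d.contains a = false := hfresh a (by simp)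
    have hins : (d.insert a (f a)).items = d.items ++ [(a, f a)] := by
      simp [PySem.Dict.insert, ha]
    rw [List.foldl_cons, ih (d.insert a (f a)) hnd.of_cons]
    · have : PySem.Dict.keys (d.insert a (f a)) = PySem.Dict.keys d ++ [a] := by
        simp [PySem.Dict.keys, hins]
      rw [this, List.append_assoc]
      rfl
    · intro n hn
      have hna : a ≠ n := List.rel_of_pairwise_cons hnd hn
      have : (d.insert a (f a)).contains n = (d.contains n || (a == n)) := by
        simp [PySem.Dict.contains, hins, List.any_append]
      rw [this, hfresh n (List.mem_cons_of_mem _ hn)]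
      simp [hna]

theorem pv_keys_foldl_insert (l : List Int) (f : Int → Int) (hnd : l.Nodup) :
    PySem.Dict.keys (l.foldl (fun g n => g.insert n (f n)) PySem.Dict.empty) = l := by
  rw [pv_keys_foldl_insert_aux l f PySem.Dict.empty hnd]
  · simp [PySem.Dict.keys, PySem.Dict.empty]
  · intro n _
    simp [PySem.Dict.contains, PySem.Dict.empty]

-- A-side characterisation: current - last_seen.get(n, -1) = pvGapOf (reversed recent) n
theorem pv_A_char (recent : List (List (String × List Int))) (n : Int) :
    (recent.length : Int) - PySem.Dict.getD (pvLastSeen recent) n (-1) = pvGapOf recent.reverse n := by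
  induction recent using List.reverseRecOn with
  | nil =>
    simp [pvLastSeen, pvGapOf, PySem.List.enumerate_nil, PySem.Dict.getD, PySem.Dict.get?,
      PySem.Dict.empty]
  | append_singleton ys d ih =>
    have hLS : pvLastSeen (ys ++ [d])
        = (pvNumbers d).foldl (fun ls n => ls.insert n ((ys.length : Int))) (pvLastSeen ys) := by
      simp [pvLastSeen, PySem.List.enumerate_append, PySem.List.enumerate_cons,
        PySem.List.enumerate_nil, List.foldl_append]
    have hget := pv_get?_foldl_insert (pvNumbers d) (fun _ => ((ys.length : Int)))
      (pvLastSeen ys) n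
    rw [hLS]
    unfold pvGapOf
    rw [List.reverse_append, List.reverse_singleton, List.singleton_append,
      List.findIdx?_cons]
    by_cases hmem : n ∈ pvNumbers d
    · have hc : (pvNumbers d).contains n = true := by simpa using hmem
      rw [hc]
      simp only [if_true]
      unfold PySem.Dict.getD
      rw [hget]
      simp [hmem]
    · have hc : (pvNumbers d).contains n = false := by simpa using hmem
      rw [hc]
      simp only [Bool.false_eq_true, if_false]
      unfold PySem.Dict.getD
      rw [hget]
      simp only [hmem, if_false]
      have ih' : (ys.length : Int) - PySem.Dict.getD (pvLastSeen ys) n (-1)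
          = pvGapOf ys.reverse n := ih
      unfold pvGapOf at ih'
      unfold PySem.Dict.getD at ih'
      cases hfi : ys.reverse.findIdx? (fun d => (pvNumbers d).contains n) with
      | some j =>
        rw [hfi] at ih'
        simp only [Option.map_some] at ⊢
        dsimp only at ih' ⊢
        simp only [List.length_append, List.length_singleton]
        push_cast
        omega
      | none =>
        rw [hfi] at ih'
        simp only [Option.map_none] at ⊢
        dsimp only at ih' ⊢
        simp only [List.length_append, List.length_reverse,
          List.length_cons, List.length_nil] at ih' ⊢
        push_cast at ih' ⊢
        omega

-- B-side inner fold, untouched number: not in remaining ⇒ state entry for it unchanged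
theorem pv_B_inner_untouched (ns : List Int) (off m : Int) :
    ∀ (st : PySem.Set Int × PySem.Dict Int Int), m ∉ st.1 →
    m ∉ (ns.foldl (fun st n => if PySem.Set.contains st.1 n then (PySem.Set.discard st.1 n, st.2.insert n off) else st) st).1 ∧
    ((ns.foldl (fun st n => if PySem.Set.contains st.1 n then (PySem.Set.discard st.1 n, st.2.insert n off) else st) st).2.get? m) = st.2.get? m := by
  induction ns with
  | nil => intro st hm; exact ⟨hm, rfl⟩
  | cons n t ih =>
    intro st hm
    simp only [List.foldl_cons]
    by_cases hc : PySem.Set.contains st.1 n = true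
    · have hn : n ∈ st.1 := by simpa [PySem.Set.contains] using hc
      have hnm : m ≠ n := fun h => hm (h ▸ hn)
      rw [hc]
      simp only [if_true]
      have hm' : m ∉ PySem.Set.discard st.1 n := by
        intro h
        exact hm (List.mem_of_mem_filter h)
      have := ih (PySem.Set.discard st.1 n, st.2.insert n off) hm'
      refine ⟨this.1, ?_⟩
      rw [this.2]
      exact PySem.Dict.get?_insert_of_ne st.2 off hnm
    · rw [Bool.not_eq_true] at hc
      rw [hc]
      simp only [Bool.false_eq_true, if_false]
      exact ih st hm

-- B-side inner fold, live number m ∈ remaining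
theorem pv_B_inner_live (ns : List Int) (off m : Int) :
    ∀ (st : PySem.Set Int × PySem.Dict Int Int), m ∈ st.1 →
    (if m ∈ ns then
      m ∉ (ns.foldl (fun st n => if PySem.Set.contains st.1 n then (PySem.Set.discard st.1 n, st.2.insert n off) else st) st).1 ∧
      ((ns.foldl (fun st n => if PySem.Set.contains st.1 n then (PySem.Set.discard st.1 n, st.2.insert n off) else st) st).2.get? m) = some off
    else
      m ∈ (ns.foldl (fun st n => if PySem.Set.contains st.1 n then (PySem.Set.discard st.1 n, st.2.insert n off) else st) st).1 ∧
      ((ns.foldl (fun st n => if PySem.Set.contains st.1 n then (PySem.Set.discard st.1 n, st.2.insert n off) else st) st).2.get? m) = st.2.get? m) := by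
  induction ns with
  | nil =>
    intro st hm
    simp only [List.foldl_nil, List.not_mem_nil, if_false]
    exact ⟨hm, trivial⟩
  | cons n t ih =>
    intro st hm
    simp only [List.foldl_cons]
    by_cases hnm : n = m
    · subst hnm
      have hc : PySem.Set.contains st.1 n = true := by simpa [PySem.Set.contains] using hm
      rw [hc]
      simp only [if_true, List.mem_cons, true_or, if_true]
      have hm' : n ∉ PySem.Set.discard st.1 n := by
        intro h
        have := List.of_mem_filter h
        simp at this
      have huntouched := pv_B_inner_untouched t off n
        (PySem.Set.discard st.1 n, st.2.insert n off) hm'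
      refine ⟨huntouched.1, ?_⟩
      rw [huntouched.2]
      exact PySem.Dict.get?_insert_self st.2 n off
    · have hmn : ¬ m = n := fun h => hnm h.symm
      have hmem : (m ∈ n :: t) = (m ∈ t) := by
        simp [List.mem_cons, hmn]
      by_cases hc : PySem.Set.contains st.1 n = true
      · have hn : n ∈ st.1 := by simpa [PySem.Set.contains] using hc
        rw [hc]
        simp only [if_true]
        have hm' : m ∈ PySem.Set.discard st.1 n := by
          apply List.mem_filter_of_mem hm
          simp [hmn]
        have := ih (PySem.Set.discard st.1 n, st.2.insert n off) hm'
        simp only [hmem]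
        by_cases hmt : m ∈ t
        · simp only [hmt, if_true] at this ⊢
          exact this
        · simp only [hmt, if_false] at this ⊢
          refine ⟨this.1, ?_⟩
          rw [this.2]
          exact PySem.Dict.get?_insert_of_ne st.2 off (fun h => hnm h.symm)
      · rw [Bool.not_eq_true] at hc
        rw [hc]
        simp only [Bool.false_eq_true, if_false]
        simp only [hmem]
        exact ih st hm

-- scan, number already settled
theorem pv_scan_settled (rs : List (List (String × List Int))) :
    ∀ (off : Int) (R : PySem.Set Int) (G : PySem.Dict Int Int) (m : Int), m ∉ R →
    m ∉ (pvScanB rs off R G).1 ∧ ((pvScanB rs off R G).2.get? m) = G.get? m := by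
  induction rs with
  | nil => intro off R G m hm; exact ⟨hm, rfl⟩
  | cons d rest ih =>
    intro off R G m hm
    unfold pvScanB
    by_cases he : R.isEmpty = true
    · rw [he]
      simp only [if_true]
      exact ⟨hm, trivial⟩
    · rw [Bool.not_eq_true] at he
      rw [he]
      simp only [Bool.false_eq_true, if_false]
      have hinner := pv_B_inner_untouched (pvNumbers d) off m (R, G) hm
      have hrest := ih (off + 1)
        ((pvNumbers d).foldl (fun st n => if PySem.Set.contains st.1 n then (PySem.Set.discard st.1 n, st.2.insert n off) else st) (R, G)).1
        ((pvNumbers d).foldl (fun st n => if PySem.Set.contains st.1 n then (PySem.Set.discard st.1 n, st.2.insert n off) else st) (R, G)).2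
        m hinner.1
      exact ⟨hrest.1, hrest.2.trans hinner.2⟩

-- scan, live number: the gap recorded is offset + (index of first hit in rs)
theorem pv_scan_live (rs : List (List (String × List Int))) :
    ∀ (off : Int) (R : PySem.Set Int) (G : PySem.Dict Int Int) (m : Int), m ∈ R →
    (match rs.findIdx? (fun d => (pvNumbers d).contains m) with
     | some j => m ∉ (pvScanB rs off R G).1 ∧ ((pvScanB rs off R G).2.get? m) = some (off + (j : Int))
     | none => m ∈ (pvScanB rs off R G).1 ∧ ((pvScanB rs off R G).2.get? m) = G.get? m) := by
  induction rs with
  | nil => intro off R G m hm; exact ⟨hm, rfl⟩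
  | cons d rest ih =>
    intro off R G m hm
    have hne : R.isEmpty = false := by
      rw [List.isEmpty_eq_false_iff_exists_mem]
      exact ⟨m, hm⟩
    have hstep : pvScanB (d :: rest) off R G = pvScanB rest (off + 1)
        ((pvNumbers d).foldl (fun st n => if PySem.Set.contains st.1 n then (PySem.Set.discard st.1 n, st.2.insert n off) else st) (R, G)).1
        ((pvNumbers d).foldl (fun st n => if PySem.Set.contains st.1 n then (PySem.Set.discard st.1 n, st.2.insert n off) else st) (R, G)).2 := by
      simp only [pvScanB, hne, Bool.false_eq_true, if_false]
    rw [List.findIdx?_cons, hstep]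
    by_cases hmem : m ∈ pvNumbers d
    · have hc : (pvNumbers d).contains m = true := by simpa using hmem
      rw [hc]
      simp only [if_true]
      have hinner := pv_B_inner_live (pvNumbers d) off m (R, G) hm
      rw [if_pos hmem] at hinner
      have hsettled := pv_scan_settled rest (off + 1)
        ((pvNumbers d).foldl (fun st n => if PySem.Set.contains st.1 n then (PySem.Set.discard st.1 n, st.2.insert n off) else st) (R, G)).1
        ((pvNumbers d).foldl (fun st n => if PySem.Set.contains st.1 n then (PySem.Set.discard st.1 n, st.2.insert n off) else st) (R, G)).2
        m hinner.1
      refine ⟨hsettled.1, ?_⟩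
      rw [hsettled.2, hinner.2]
      norm_num
    · have hc : (pvNumbers d).contains m = false := by simpa using hmem
      rw [hc]
      simp only [Bool.false_eq_true, if_false]
      have hinner := pv_B_inner_live (pvNumbers d) off m (R, G) hm
      rw [if_neg hmem] at hinner
      have hrest := ih (off + 1)
        ((pvNumbers d).foldl (fun st n => if PySem.Set.contains st.1 n then (PySem.Set.discard st.1 n, st.2.insert n off) else st) (R, G)).1
        ((pvNumbers d).foldl (fun st n => if PySem.Set.contains st.1 n then (PySem.Set.discard st.1 n, st.2.insert n off) else st) (R, G)).2
        m hinner.1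
      cases hfi : rest.findIdx? (fun d => (pvNumbers d).contains m) with
      | some j =>
        rw [hfi] at hrest
        simp only [Option.map_some]
        refine ⟨hrest.1, ?_⟩
        rw [hrest.2]
        congr 1
        push_cast
        ring
      | none =>
        rw [hfi] at hrest
        simp only [Option.map_none]
        exact ⟨hrest.1, hrest.2.trans hinner.2⟩

-- element-wise agreement of two insertion predicates gives the same insertion
theorem pv_insertBy_congr (bf bg : Int → Int → Bool) (x : Int) :
    ∀ (ys : List Int), (∀ y ∈ ys, bf x y = bg x y) →
    PySem.List.insertBy bf x ys = PySem.List.insertBy bg x ys := by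
  intro ys
  induction ys with
  | nil => intro _; rfl
  | cons y t ih =>
    intro h
    have hy : bf x y = bg x y := h y (by simp)
    simp only [PySem.List.insertBy, hy]
    by_cases hb : bg x y = true
    · rw [hb]; simp
    · rw [Bool.not_eq_true] at hb
      rw [hb]
      simp only [Bool.false_eq_true, if_false, List.cons.injEq, true_and]
      exact ih (fun y hy => h y (List.mem_cons_of_mem _ hy))

-- a stable insertion sort under two predicates that agree on (later, earlier) pairs
theorem pv_foldl_insertBy_congr (bf bg : Int → Int → Bool) :
    ∀ (xs acc : List Int), xs.Pairwise (fun y x => bf x y = bg x y) →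
    (∀ x ∈ xs, ∀ y ∈ acc, bf x y = bg x y) →
    xs.foldl (fun a x => PySem.List.insertBy bf x a) acc
      = xs.foldl (fun a x => PySem.List.insertBy bg x a) acc := by
  intro xs
  induction xs with
  | nil => intro acc _ _; rfl
  | cons x t ih =>
    intro acc hp hacc
    have hx := pv_insertBy_congr bf bg x acc (hacc x (by simp))
    simp only [List.foldl_cons, hx]
    apply ih _ hp.of_cons
    intro x' hx' y hy
    rcases (PySem.List.mem_insertBy _ _ _ _).1 hy with h | h
    · subst h
      exact List.rel_of_pairwise_cons hp hx'
    · exact hacc x' (List.mem_cons_of_mem _ hx') y h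

theorem pv_pairwise_true (xs : List Int) : xs.Pairwise (fun _ _ => True) := by
  induction xs with
  | nil => simp
  | cons a t ih => exact List.Pairwise.cons (fun _ _ => trivial) ih

-- sorting the same list with keys that agree on its members gives the same list
theorem pv_sorted_key_congr (k1 k2 : Int → Int) (xs : List Int)
    (h : ∀ x ∈ xs, k1 x = k2 x) :
    PySem.List.sorted xs k1 false = PySem.List.sorted xs k2 false := by
  rw [PySem.List.sorted_eq_foldl_insertBy, PySem.List.sorted_eq_foldl_insertBy]
  apply pv_foldl_insertBy_congr
  · exact (pv_pairwise_true xs).imp_of_mem (fun ha hb _ => by rw [h _ ha, h _ hb])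
  · intro _ _ y hy
    exact absurd hy (List.not_mem_nil)

-- stability: sorting ascending 1..39 by key -g equals sorting by the combined
-- injective key n - g n * 40 (gap descending, number ascending on ties)
theorem pv_stable_vs_combined (g : Int → Int) :
    PySem.List.sorted (PySem.List.pyRange 1 (39 + 1) 1) (fun x => -(g x)) false
      = PySem.List.sorted (PySem.List.pyRange 1 (39 + 1) 1) (fun n => n - g n * (39 + 1)) false := by
  rw [PySem.List.sorted_eq_foldl_insertBy, PySem.List.sorted_eq_foldl_insertBy]
  apply pv_foldl_insertBy_congr
  · apply (PySem.List.pairwise_lt_pyRange_one 1 (39 + 1)).imp_of_mem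
    intro y x hy hx hlt
    have hby := (PySem.List.mem_pyRange_one).1 hy
    have hbx := (PySem.List.mem_pyRange_one).1 hx
    rw [decide_eq_decide]
    constructor
    · intro h; omega
    · intro h; omega
  · intro _ _ y hy
    exact absurd hy (List.not_mem_nil)

-- B-side characterisation: the final gaps dict of B looks up to pvGapOf
theorem pv_B_char (recent : List (List (String × List Int))) (n : Int)
    (hn : n ∈ PySem.List.pyRange 1 (39 + 1) 1) :
    PySem.Dict.getD
      ((pvScanB recent.reverse 1 (PySem.Set.ofList (PySem.List.pyRange 1 (39 + 1) 1)) PySem.Dict.empty).1.foldl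
        (fun g n => g.insert n ((recent.length : Int) + 1))
        (pvScanB recent.reverse 1 (PySem.Set.ofList (PySem.List.pyRange 1 (39 + 1) 1)) PySem.Dict.empty).2)
      n 0 = pvGapOf recent.reverse n := by
  have hn0 : n ∈ PySem.Set.ofList (PySem.List.pyRange 1 (39 + 1) 1) :=
    (PySem.Set.mem_ofList _ _).2 hn
  have hlive := pv_scan_live recent.reverse 1
    (PySem.Set.ofList (PySem.List.pyRange 1 (39 + 1) 1)) PySem.Dict.empty n hn0
  unfold PySem.Dict.getD
  rw [pv_get?_foldl_insert _ (fun _ => ((recent.length : Int) + 1)) _ n]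
  unfold pvGapOf
  cases hfi : recent.reverse.findIdx? (fun d => (pvNumbers d).contains n) with
  | some j =>
    rw [hfi] at hlive
    rw [if_neg hlive.1, hlive.2]
    simp only [Option.getD_some]
    ring
  | none =>
    rw [hfi] at hlive
    rw [if_pos hlive.1]
    simp [List.length_reverse]

-- ===== VERDICT (by name: the statement is the Claim_ definition above) =====
-- every key of A's gaps dict looks up to the common gap function pvGapOf
theorem pv_A_getD (recent : List (List (String × List Int))) (x : Int)
    (hx : x ∈ PySem.List.pyRange 1 (39 + 1) 1) :
    PySem.Dict.getD (pvGapsA recent) x 0 = pvGapOf recent.reverse x := by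
  unfold pvGapsA PySem.Dict.getD
  rw [pv_get?_foldl_insert _ (fun n => (recent.length : Int) - ((pvLastSeen recent).get? n).getD (-1)) _ x]
  rw [if_pos hx]
  simp only [Option.getD_some]
  exact pv_A_char recent x

-- ===== VERDICT (by name: the statement is the Claim_ definition above) =====
theorem method_gap_spec : Claim_equal_method_gap := by
  intro hist window _ _
  unfold Spec_method_gap method_gap method_gap_alt
  simp only []
  set recent := PySem.List.slice hist (some (-window)) none with hrec
  set g : Int → Int := pvGapOf recent.reverse with hg
  -- A's sorted keys list
  have hkeys : PySem.Dict.keys (pvGapsA recent) = PySem.List.pyRange 1 (39 + 1) 1 := by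
    unfold pvGapsA
    exact pv_keys_foldl_insert _ _ (PySem.List.nodup_pyRange_one 1 (39 + 1))
  rw [hkeys]
  have hA : PySem.List.sorted (PySem.List.pyRange 1 (39 + 1) 1)
      (fun x => -(PySem.Dict.getD (pvGapsA recent) x 0)) false
      = PySem.List.sorted (PySem.List.pyRange 1 (39 + 1) 1) (fun x => -(g x)) false := by
    apply pv_sorted_key_congr
    intro x hx
    rw [pv_A_getD recent x hx]
  have hB : PySem.List.sorted (PySem.List.pyRange 1 (39 + 1) 1)
      (fun x => x - PySem.Dict.getD
        ((pvScanB recent.reverse 1 (PySem.Set.ofList (PySem.List.pyRange 1 (39 + 1) 1)) PySem.Dict.empty).1.foldl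
          (fun g n => g.insert n ((recent.length : Int) + 1))
          (pvScanB recent.reverse 1 (PySem.Set.ofList (PySem.List.pyRange 1 (39 + 1) 1)) PySem.Dict.empty).2)
        x 0 * (39 + 1)) false
      = PySem.List.sorted (PySem.List.pyRange 1 (39 + 1) 1) (fun x => x - g x * (39 + 1)) false := by
    apply pv_sorted_key_congr
    intro x hx
    rw [pv_B_char recent x hx]
  rw [hA, pv_stable_vs_combined g, ← hB]
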